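-- pv_equiv track=rewrite | github.com/inakiam/fractale | cTools.py | smoothIt
-- ===== SOURCE A (Python) =====
-- def smoothIt(pallet, r=0):  # R = NUMBER OF RECURSIONS
--
--     pal = []
--
--     for i in range(len(pallet)):
--         pal += pallet[i]
--
--     pT = pal[3:] + pal[:3]
--
--     intermediates = [(pal[i] + pT[i]) // 2 for i in range(len(pal))]
--
--     smoothed = []
--
--     for i in range(0, len(pal), 3):
--         smoothed += [[pal[i], pal[i + 1], pal[i + 2]]]
--         smoothed += [[intermediates[i], intermediates[i + 1], intermediates[i + 2]]]
--
--     if r > 0: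
--         smoothed = smoothIt(smoothed, r - 1)
--
--     return smoothed
-- ===== SOURCE B (Python) =====
-- def smoothIt(pallet, r=0):  # R = NUMBER OF RECURSIONS
--     # Iterative: apply one fused smoothing step (r+1 if r>0 else 1) times on a flat
--     # channel list, regrouping into triples only once at the end.
--     pal = [c for row in pallet for c in row]
--     steps = r + 1 if r > 0 else 1
--     for _ in range(steps):
--         n = len(pal)
--         out = []
--         for i in range(0, n, 3):
--             a, b, c = pal[i], pal[i + 1], pal[i + 2]
--             out += [a, b, c,
--                     (a + pal[(i + 3) % n]) // 2,
--                     (b + pal[(i + 4) % n]) // 2,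
--                     (c + pal[(i + 5) % n]) // 2]
--         pal = out
--     return [pal[i:i + 3] for i in range(0, len(pal), 3)]
-- ===== Notes on version B (the rewrite author's own statement) =====
-- stated objective: alternative
-- what changed: Replaces A's recursion and its three separate passes (rotate-copy pT, intermediates comprehension, interleave loop) with an iterative driver that applies one fused single-pass smoothing step to a flat channel list max(r,0)+1 times, computing wrap-around midpoints inline via (i+3)%n and regrouping into triples only once at the end.
import Mathlib
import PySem

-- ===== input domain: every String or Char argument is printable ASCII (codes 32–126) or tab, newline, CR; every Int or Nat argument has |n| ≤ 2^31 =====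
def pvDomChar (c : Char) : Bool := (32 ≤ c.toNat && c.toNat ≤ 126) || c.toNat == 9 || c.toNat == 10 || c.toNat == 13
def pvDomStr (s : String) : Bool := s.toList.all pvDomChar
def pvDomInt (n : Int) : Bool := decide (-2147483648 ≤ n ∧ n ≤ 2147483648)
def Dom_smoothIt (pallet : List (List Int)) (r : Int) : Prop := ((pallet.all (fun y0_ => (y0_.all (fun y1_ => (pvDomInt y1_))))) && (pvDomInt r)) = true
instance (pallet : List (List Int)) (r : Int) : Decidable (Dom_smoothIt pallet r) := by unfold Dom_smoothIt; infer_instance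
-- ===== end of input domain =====

-- B replaces A's recursion and per-level triple passes by an iterative, single fused
-- pass per smoothing level over a flat channel list (objective: alternative decomposition,
-- same cost). Equivalence is proved on palettes whose total channel count is a multiple of 3.

-- ===== PORT A =====
def smoothIt (pallet : List (List Int)) (r : Int) : List (List Int) :=
  -- pal = []; for i in range(len(pallet)): pal += pallet[i]
  let pal : List Int := pallet.foldl (fun acc row => acc ++ row) []
  -- pT = pal[3:] + pal[:3]
  let pT : List Int := PySem.List.slice pal (some 3) none ++ PySem.List.slice pal none (some 3)
  -- intermediates = [(pal[i] + pT[i]) // 2 for i in range(len(pal))]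
  let intermediates : List Int := (PySem.List.pyRange 0 (pal.length : Int) 1).map
      (fun i => PySem.Int.floordiv (PySem.List.pyGetD pal i 0 + PySem.List.pyGetD pT i 0) 2)
  -- for i in range(0, len(pal), 3): smoothed += [[pal[i],pal[i+1],pal[i+2]]]; smoothed += [[intermediates[i],…]]
  let smoothed : List (List Int) := (PySem.List.pyRange 0 (pal.length : Int) 3).foldl
      (fun acc i =>
        acc ++ [[PySem.List.pyGetD pal i 0, PySem.List.pyGetD pal (i + 1) 0,
                 PySem.List.pyGetD pal (i + 2) 0]]
            ++ [[PySem.List.pyGetD intermediates i 0, PySem.List.pyGetD intermediates (i + 1) 0,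
                 PySem.List.pyGetD intermediates (i + 2) 0]]) []
  if h : 0 < r then smoothIt smoothed (r - 1) else smoothed
termination_by r.toNat
decreasing_by omega

-- ===== PORT B =====
-- one fused smoothing step over the flat channel list (the body of Source B's outer loop)
def pvStep (pal : List Int) : List Int :=
  (PySem.List.pyRange 0 (pal.length : Int) 3).foldl
    (fun out i =>
      let a := PySem.List.pyGetD pal i 0
      let b := PySem.List.pyGetD pal (i + 1) 0
      let c := PySem.List.pyGetD pal (i + 2) 0
      out ++ [a, b, c,
        PySem.Int.floordiv (a + PySem.List.pyGetD pal (PySem.Int.mod (i + 3) (pal.length : Int)) 0) 2,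
        PySem.Int.floordiv (b + PySem.List.pyGetD pal (PySem.Int.mod (i + 4) (pal.length : Int)) 0) 2,
        PySem.Int.floordiv (c + PySem.List.pyGetD pal (PySem.Int.mod (i + 5) (pal.length : Int)) 0) 2]) []

-- for _ in range(steps): pal = step(pal)
def pvStepN (pal : List Int) : Nat → List Int
  | 0 => pal
  | n + 1 => pvStepN (pvStep pal) n

-- return [pal[i:i+3] for i in range(0, len(pal), 3)]
def pvGroup3 (xs : List Int) : List (List Int) :=
  (PySem.List.pyRange 0 (xs.length : Int) 3).map
    (fun i => PySem.List.slice xs (some i) (some (i + 3)))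

def smoothIt_alt (pallet : List (List Int)) (r : Int) : List (List Int) :=
  let pal : List Int := pallet.flatMap (fun row => row)
  let steps : Int := if 0 < r then r + 1 else 1
  pvGroup3 (pvStepN pal steps.toNat)

-- ===== PRECONDITION & SPEC =====
-- Pre_ excludes palettes whose total channel count is not a multiple of 3: there the last
-- chunk of A's interleave loop indexes past the end of pal and A raises IndexError.
def Pre_smoothIt (pallet : List (List Int)) (r : Int) : Prop :=
  3 ∣ (pallet.flatten).length
instance (pallet : List (List Int)) (r : Int) : Decidable (Pre_smoothIt pallet r) := by
  unfold Pre_smoothIt; infer_instance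

def pvWitness_smoothIt : List (List Int) × Int := ([[10, 20, 30], [40, 50, 60]], 1)

def Spec_smoothIt (pallet : List (List Int)) (r : Int) (out : List (List Int)) : Prop := out = smoothIt_alt pallet r
instance (pallet : List (List Int)) (r : Int) (out : List (List Int)) : Decidable (Spec_smoothIt pallet r out) := by unfold Spec_smoothIt; infer_instance

-- ===== CLAIM (what is proved, stated in full; the proofs are below) =====
def Claim_equal_smoothIt : Prop := ∀ (pallet : List (List Int)) (r : Int), Dom_smoothIt pallet r → Pre_smoothIt pallet r → Spec_smoothIt pallet r (smoothIt pallet r)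

-- ===== LEMMAS AND PROOFS =====

def mid3 (pal : List Int) (j : Nat) : Int :=
  PySem.Int.floordiv (pal.getD j 0 + pal.getD ((j + 3) % pal.length) 0) 2

def chunkA (pal : List Int) (k : Nat) : List (List Int) :=
  [[pal.getD (3*k) 0, pal.getD (3*k+1) 0, pal.getD (3*k+2) 0],
   [mid3 pal (3*k), mid3 pal (3*k+1), mid3 pal (3*k+2)]]

lemma foldl_append_nil (L : List (List Int)) (init : List Int) :
    L.foldl (fun a r => a ++ r) init = init ++ L.flatten := by
  induction L generalizing init with
  | nil => simp
  | cons h t ih => simp [List.foldl_cons, ih, List.append_assoc]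

lemma pyRange3 (q : Nat) :
    PySem.List.pyRange 0 ((3*q : Nat) : Int) 3 = (List.range q).map (fun k => ((3*k : Nat) : Int)) := by
  rw [PySem.List.pyRange_of_pos 0 ((3*q : Nat) : Int) (by norm_num)]
  rcases Nat.eq_zero_or_pos q with h | h
  · subst h; simp
  · have h1 : (0:Int) < ((3*q : Nat) : Int) := by push_cast; omega
    rw [if_pos h1]
    have h2 : ((((3*q : Nat) : Int) - 0 + 3 - 1) / 3).toNat = q := by push_cast; omega
    rw [h2]
    apply List.map_congr_left
    intro k _; push_cast; ring

lemma getD_eq (l : List Int) (n : Nat) : l.getD n 0 = (l[n]?).getD 0 := by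
  simp [List.getD]

lemma pT_getD (pal : List Int) (q : Nat) (hq : pal.length = 3*q) (j : Nat) (hj : j < 3*q) :
    (pal.drop 3 ++ pal.take 3).getD j 0 = pal.getD ((j + 3) % pal.length) 0 := by
  have hq1 : 1 ≤ q := by omega
  have hlen : (pal.drop 3).length = 3*q - 3 := by simp [hq]
  rw [getD_eq, getD_eq]
  by_cases h : j < 3*q - 3
  · rw [List.getElem?_append_left (by omega)]
    rw [List.getElem?_drop]
    have : (j + 3) % pal.length = 3 + j := by
      rw [hq, Nat.mod_eq_of_lt (by omega)]; omega
    rw [this]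
  · rw [List.getElem?_append_right (by omega)]
    rw [hlen, List.getElem?_take]
    rw [if_pos (by omega)]
    have : (j + 3) % pal.length = j - (3*q - 3) := by
      rw [hq, Nat.mod_eq_sub_mod (by omega), Nat.mod_eq_of_lt (by omega)]; omega
    rw [this]

lemma cast_add (a c : Nat) : ((a : Nat) : Int) + (c : Int) = (((a + c : Nat)) : Int) := by push_cast; ring

lemma pvStep_eq (pal : List Int) (q : Nat) (hq : pal.length = 3*q) :
    pvStep pal = (List.range q).flatMap (fun k =>
      [pal.getD (3*k) 0, pal.getD (3*k+1) 0, pal.getD (3*k+2) 0,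
       mid3 pal (3*k), mid3 pal (3*k+1), mid3 pal (3*k+2)]) := by
  unfold pvStep
  rw [show ((pal.length : Int)) = (((3*q : Nat)) : Int) by rw [hq]]
  rw [pyRange3, List.foldl_map, PySem.List.foldl_append_eq_flatMap, List.nil_append]
  apply List.flatMap_congr
  intro k hk
  dsimp only
  have hkq : k < q := List.mem_range.mp hk
  have hq1 : (0:Int) < ((3*q : Nat) : Int) := by push_cast; omega
  have E : ∀ c : Nat, ((3*k : Nat) : Int) + (c : Int) = ((3*k+c : Nat) : Int) := by
    intro c; push_cast; ring
  have M : ∀ c : Nat, PySem.Int.mod (((3*k : Nat) : Int) + (c : Int)) ((3*q : Nat) : Int)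
      = (((3*k+c) % (3*q) : Nat) : Int) := by
    intro c
    rw [PySem.Int.mod_eq_emod_of_pos hq1]; push_cast; ring_nf
  simp only [mid3, hq]
  rw [show ((3*k : Nat) : Int) + (1:Int) = (((3*k : Nat) : Int) + ((1:Nat) : Int)) by norm_num,
      show ((3*k : Nat) : Int) + (2:Int) = (((3*k : Nat) : Int) + ((2:Nat) : Int)) by norm_num,
      show ((3*k : Nat) : Int) + (3:Int) = (((3*k : Nat) : Int) + ((3:Nat) : Int)) by norm_num,
      show ((3*k : Nat) : Int) + (4:Int) = (((3*k : Nat) : Int) + ((4:Nat) : Int)) by norm_num,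
      show ((3*k : Nat) : Int) + (5:Int) = (((3*k : Nat) : Int) + ((5:Nat) : Int)) by norm_num,
      M 3, M 4, M 5, E 1, E 2]
  simp only [PySem.List.pyGetD_natCast]

def pvAsm (pal : List Int) : List (List Int) :=
  let pT : List Int := PySem.List.slice pal (some 3) none ++ PySem.List.slice pal none (some 3)
  let intermediates : List Int := (PySem.List.pyRange 0 (pal.length : Int) 1).map
      (fun i => PySem.Int.floordiv (PySem.List.pyGetD pal i 0 + PySem.List.pyGetD pT i 0) 2)
  (PySem.List.pyRange 0 (pal.length : Int) 3).foldl
      (fun acc i =>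
        acc ++ [[PySem.List.pyGetD pal i 0, PySem.List.pyGetD pal (i + 1) 0,
                 PySem.List.pyGetD pal (i + 2) 0]]
            ++ [[PySem.List.pyGetD intermediates i 0, PySem.List.pyGetD intermediates (i + 1) 0,
                 PySem.List.pyGetD intermediates (i + 2) 0]]) []

lemma smoothIt_unfold (pallet : List (List Int)) (r : Int) :
    smoothIt pallet r =
      if 0 < r then smoothIt (pvAsm (pallet.foldl (fun acc row => acc ++ row) [])) (r - 1)
      else pvAsm (pallet.foldl (fun acc row => acc ++ row) []) := by
  rw [smoothIt]
  simp only [pvAsm]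
  split <;> rfl

lemma asm_eq (pal : List Int) (q : Nat) (hq : pal.length = 3*q) :
    pvAsm pal = (List.range q).flatMap (chunkA pal) := by
  unfold pvAsm
  simp only [List.append_assoc]
  rw [show ((pal.length : Int)) = (((3*q : Nat)) : Int) by rw [hq]]
  rw [pyRange3, List.foldl_map]
  simp only [List.cons_append, List.nil_append]
  rw [PySem.List.foldl_append_eq_flatMap
        (fun k => [[PySem.List.pyGetD pal ((3*k : Nat) : Int) 0,
                 PySem.List.pyGetD pal (((3*k : Nat) : Int) + 1) 0,
                 PySem.List.pyGetD pal (((3*k : Nat) : Int) + 2) 0],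
                [PySem.List.pyGetD ((PySem.List.pyRange 0 ((3*q : Nat) : Int) 1).map
                    (fun i => PySem.Int.floordiv (PySem.List.pyGetD pal i 0 +
                      PySem.List.pyGetD (PySem.List.slice pal (some 3) none ++ PySem.List.slice pal none (some 3)) i 0) 2))
                  ((3*k : Nat) : Int) 0,
                 PySem.List.pyGetD ((PySem.List.pyRange 0 ((3*q : Nat) : Int) 1).map
                    (fun i => PySem.Int.floordiv (PySem.List.pyGetD pal i 0 +
                      PySem.List.pyGetD (PySem.List.slice pal (some 3) none ++ PySem.List.slice pal none (some 3)) i 0) 2))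
                  (((3*k : Nat) : Int) + 1) 0,
                 PySem.List.pyGetD ((PySem.List.pyRange 0 ((3*q : Nat) : Int) 1).map
                    (fun i => PySem.Int.floordiv (PySem.List.pyGetD pal i 0 +
                      PySem.List.pyGetD (PySem.List.slice pal (some 3) none ++ PySem.List.slice pal none (some 3)) i 0) 2))
                  (((3*k : Nat) : Int) + 2) 0]]),
      List.nil_append]
  apply List.flatMap_congr
  intro k hk
  have hkq : k < q := List.mem_range.mp hk
  have hq1 : (0:Int) < ((3*q : Nat) : Int) := by push_cast; omega
  have I : ∀ c : Nat, c < 3 →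
      PySem.List.pyGetD ((PySem.List.pyRange 0 ((3*q : Nat) : Int) 1).map
          (fun i => PySem.Int.floordiv (PySem.List.pyGetD pal i 0 +
            PySem.List.pyGetD (PySem.List.slice pal (some 3) none ++ PySem.List.slice pal none (some 3)) i 0) 2))
        (((3*k : Nat) : Int) + (c : Int)) 0
      = PySem.Int.floordiv (pal.getD (3*k+c) 0 + pal.getD ((3*k+c+3) % pal.length) 0) 2 := by
    intro c hc
    rw [cast_add, PySem.List.pyGetD_map_pyRange_of_nonneg _ _ _ _ (by positivity) (by push_cast; omega)]
    rw [PySem.List.pyGetD_natCast, PySem.List.pyGetD_natCast]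
    rw [PySem.List.slice_from pal (by norm_num), PySem.List.slice_to pal (by norm_num)]
    rw [show ((3:Int).toNat) = 3 from rfl]
    rw [pT_getD pal q hq (3*k+c) (by omega)]
  have E : ∀ c : Nat, PySem.List.pyGetD pal (((3*k : Nat) : Int) + (c : Int)) 0 = pal.getD (3*k+c) 0 := by
    intro c; rw [cast_add, PySem.List.pyGetD_natCast]
  simp only [chunkA, mid3]
  rw [show (((3*k : Nat) : Int)) + (1:Int) = (((3*k : Nat) : Int) + ((1:Nat) : Int)) by norm_num,
      show (((3*k : Nat) : Int)) + (2:Int) = (((3*k : Nat) : Int) + ((2:Nat) : Int)) by norm_num]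
  have I0 := I 0 (by omega); have E0 := E 0
  simp only [Nat.cast_zero, add_zero] at I0 E0
  rw [I0, I 1 (by omega), I 2 (by omega), E0, E 1, E 2]

lemma flatten_flatMap {α β : Type} (f : α → List (List β)) (l : List α) :
    (l.flatMap f).flatten = l.flatMap (fun a => (f a).flatten) := by
  induction l with
  | nil => simp
  | cons h t ih => simp [ih]

lemma map_take_drop (L : List (List Int)) (h : ∀ l ∈ L, l.length = 3) :
    (List.range L.length).map (fun k => (L.flatten.drop (3*k)).take 3) = L := by
  induction L with
  | nil => simp
  | cons x t ih =>
    have hx : x.length = 3 := h x (by simp)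
    simp only [List.length_cons, List.range_succ_eq_map, List.map_cons, List.map_map]
    have h1 : List.take 3 (List.drop (3*0) (x :: t).flatten) = x := by
      have : (x :: t).flatten = x ++ t.flatten := List.flatten_cons ..
      rw [this, Nat.mul_zero, List.drop_zero, List.take_append_of_le_length (by omega),
          List.take_of_length_le (by omega)]
    have h2 : ((fun k => List.take 3 (List.drop (3*k) (x :: t).flatten)) ∘ Nat.succ)
        = fun k => List.take 3 (List.drop (3*k) t.flatten) := by
      funext k
      simp only [Function.comp, List.flatten_cons]
      rw [show 3*(Nat.succ k) = x.length + 3*k by omega, List.drop_append]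
      rw [List.drop_of_length_le (by omega), List.nil_append,
          show x.length + 3*k - x.length = 3*k by omega]
    rw [h1, h2, ih (fun l hl => h l (by simp [hl]))]

lemma length_flatten3 (L : List (List Int)) (h : ∀ l ∈ L, l.length = 3) :
    L.flatten.length = 3 * L.length := by
  induction L with
  | nil => simp
  | cons x t ih =>
    have hx : x.length = 3 := h x (by simp)
    simp only [List.flatten_cons, List.length_append, List.length_cons, hx,
      ih (fun l hl => h l (by simp [hl]))]
    ring

lemma group3_flatten (L : List (List Int)) (h : ∀ l ∈ L, l.length = 3) :
    pvGroup3 L.flatten = L := by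
  unfold pvGroup3
  rw [length_flatten3 L h, pyRange3, List.map_map]
  rw [show ((fun i => PySem.List.slice L.flatten (some i) (some (i+3))) ∘ (fun k : Nat => ((3*k : Nat) : Int)))
      = fun k : Nat => (L.flatten.drop (3*k)).take 3 by
    funext k
    simp only [Function.comp]
    rw [show (((3*k : Nat) : Int) + 3) = (((3*k+3 : Nat)) : Int) by push_cast; ring,
        PySem.List.slice_natCast]
    congr 1
    omega]
  exact map_take_drop L h

lemma chunkA_len (pal : List Int) (q : Nat) :
    ∀ l ∈ (List.range q).flatMap (chunkA pal), l.length = 3 := by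
  intro l hl
  simp only [List.mem_flatMap, chunkA, List.mem_cons] at hl
  obtain ⟨k, -, h | h | h⟩ := hl <;> first | (subst h; rfl) | exact absurd h (by simp)

lemma flatten_eq_step (pal : List Int) (q : Nat) (hq : pal.length = 3*q) :
    ((List.range q).flatMap (chunkA pal)).flatten = pvStep pal := by
  rw [pvStep_eq pal q hq, flatten_flatMap]
  apply List.flatMap_congr
  intro k _
  simp [chunkA]

lemma step_case (pal : List Int) (q : Nat) (hq : pal.length = 3*q) :
    pvAsm pal = pvGroup3 (pvStep pal) := by
  rw [asm_eq pal q hq, ← flatten_eq_step pal q hq,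
      group3_flatten _ (chunkA_len pal q)]

lemma step_len (pal : List Int) (q : Nat) (hq : pal.length = 3*q) :
    (pvStep pal).length = 3*(2*q) := by
  rw [← flatten_eq_step pal q hq, length_flatten3 _ (chunkA_len pal q)]
  simp [List.length_flatMap, chunkA]
  ring

lemma main_eq (N : Nat) : ∀ (pallet : List (List Int)) (r : Int), r.toNat ≤ N →
    3 ∣ pallet.flatten.length →
    smoothIt pallet r = pvGroup3 (pvStepN pallet.flatten (if 0 < r then r + 1 else 1).toNat) := by
  induction N with
  | zero =>
    intro pallet r hN h3
    obtain ⟨q, hq⟩ := h3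
    have hr : ¬ 0 < r := by omega
    rw [smoothIt_unfold, foldl_append_nil, List.nil_append, if_neg hr, if_neg hr]
    rw [show ((1:Int).toNat) = 1 from rfl]
    exact step_case _ q hq
  | succ n ih =>
    intro pallet r hN h3
    obtain ⟨q, hq⟩ := h3
    rw [smoothIt_unfold, foldl_append_nil, List.nil_append]
    by_cases hr : 0 < r
    · rw [if_pos hr, if_pos hr]
      have hflat : (pvAsm pallet.flatten).flatten = pvStep pallet.flatten := by
        rw [asm_eq _ q hq, flatten_eq_step _ q hq]
      have hdiv : 3 ∣ (pvAsm pallet.flatten).flatten.length := by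
        rw [hflat, step_len _ q hq]; exact ⟨2*q, rfl⟩
      rw [ih (pvAsm pallet.flatten) (r-1) (by omega) hdiv, hflat]
      have hsteps : (if 0 < r then r + 1 else 1).toNat
          = (if 0 < r - 1 then (r - 1) + 1 else 1).toNat + 1 := by
        split_ifs <;> omega
      rw [if_pos hr] at hsteps
      rw [hsteps]
      rfl
    · rw [if_neg hr, if_neg hr, show ((1:Int).toNat) = 1 from rfl]
      exact step_case _ q hq

-- ===== VERDICT (by name: the statement is the Claim_ definition above) =====
theorem smoothIt_spec : Claim_equal_smoothIt := by
  intro pallet r _hdom hpre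
  show smoothIt pallet r = smoothIt_alt pallet r
  unfold smoothIt_alt
  rw [show pallet.flatMap (fun row => row) = pallet.flatten by simp]
  exact main_eq r.toNat pallet r le_rfl hpre
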